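-- pv_equiv track=rewrite | github.com/mikuh/migi | src/migi/automation/engine.py | _format_action_history
-- ===== SOURCE A (Python) =====
-- def _format_action_history(action_history: list[str] | None) -> str | None:
--     if not action_history:
--         return None
--     trimmed = [item.strip() for item in action_history if item.strip()]
--     if not trimmed:
--         return None
--     recent = trimmed[-12:]
--     return "[Action History]\n" + "\n".join(recent)
-- ===== SOURCE B (Python) =====
-- def _format_action_history(action_history: list[str] | None) -> str | None:
--     collected = []
--     for item in reversed(action_history or []):
--         s = item.strip()
--         if s:
--             collected.append(s)
--             if len(collected) == 12:
--                 break
--     if not collected: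
--         return None
--     collected.reverse()
--     return "[Action History]\n" + "\n".join(collected)
-- ===== Notes on version B (the rewrite author's own statement) =====
-- stated objective: faster
-- what changed: Replaces forward filter-everything-then-slice-the-tail with a bounded backward scan that stops as soon as 12 non-empty stripped entries are collected (reversing the 12-element collector at the end), so long histories are never fully stripped/filtered; the empty-collector guard covers both of A's None cases.
import Mathlib
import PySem

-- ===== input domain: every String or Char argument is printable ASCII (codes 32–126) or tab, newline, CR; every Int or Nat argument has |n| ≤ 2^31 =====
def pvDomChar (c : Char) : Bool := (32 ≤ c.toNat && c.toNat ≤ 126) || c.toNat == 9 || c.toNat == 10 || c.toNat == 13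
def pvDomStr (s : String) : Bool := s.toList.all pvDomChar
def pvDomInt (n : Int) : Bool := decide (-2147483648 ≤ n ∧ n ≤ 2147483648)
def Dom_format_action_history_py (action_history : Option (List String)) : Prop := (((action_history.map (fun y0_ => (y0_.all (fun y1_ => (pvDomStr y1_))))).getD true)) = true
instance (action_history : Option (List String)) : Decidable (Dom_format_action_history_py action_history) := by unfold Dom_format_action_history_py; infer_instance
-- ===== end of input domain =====

-- ===== PORT A =====
-- B changes: a bounded backward scan that stops after 12 collected entries, instead of
-- filtering the whole list and slicing its tail (objective: alternative decomposition).
def format_action_history_py (action_history : Option (List String)) : Option String :=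
  match action_history with
  | none => none
  | some l =>
    if l = [] then none
    else
      let trimmed := (l.filter (fun item => PySem.Str.strip item != "")).map PySem.Str.strip
      if trimmed = [] then none
      else some ("[Action History]\n" ++ PySem.Str.join "\n" (PySem.List.slice trimmed (some (-12)) none))

-- ===== PORT B =====
-- collector loop over the reversed list: append stripped non-empty items, stop at 12
def fahCollect : List String → List String → List String
  | [], acc => acc
  | item :: rest, acc =>
      let s := PySem.Str.strip item
      if s = "" then fahCollect rest acc
      else
        let acc' := acc ++ [s]
        if acc'.length = 12 then acc' else fahCollect rest acc'

def format_action_history_py_alt (action_history : Option (List String)) : Option String :=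
  let collected := fahCollect (action_history.getD []).reverse []
  if collected = [] then none
  else some ("[Action History]\n" ++ PySem.Str.join "\n" collected.reverse)

-- ===== PRECONDITION & SPEC =====
def Spec_format_action_history_py (action_history : Option (List String)) (out : Option String) : Prop := out = format_action_history_py_alt action_history
instance (action_history : Option (List String)) (out : Option String) : Decidable (Spec_format_action_history_py action_history out) := by unfold Spec_format_action_history_py; infer_instance

-- ===== CLAIM (what is proved, stated in full; the proofs are below) =====
def Claim_equal_format_action_history_py : Prop := ∀ (action_history : Option (List String)), Dom_format_action_history_py action_history → Spec_format_action_history_py action_history (format_action_history_py action_history)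

-- ===== LEMMAS AND PROOFS =====

-- ===== VERDICT (by name: the statement is the Claim_ definition above) =====
-- trimmed as a single filterMap
def fahTr (l : List String) : List String :=
  l.filterMap (fun item => let s := PySem.Str.strip item; if s = "" then none else some s)

theorem fahTr_eq (l : List String) :
    (l.filter (fun item => PySem.Str.strip item != "")).map PySem.Str.strip = fahTr l := by
  induction l with
  | nil => rfl
  | cons a t ih =>
    simp only [fahTr, List.filter_cons, List.filterMap_cons] at *
    by_cases h : PySem.Str.strip a = "" <;> simp [h, ih]

theorem fahCollect_eq (xs acc : List String) (h : acc.length < 12) :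
    fahCollect xs acc = acc ++ (fahTr xs).take (12 - acc.length) := by
  induction xs generalizing acc with
  | nil => simp [fahCollect, fahTr]
  | cons a t ih =>
    simp only [fahCollect, fahTr, List.filterMap_cons]
    by_cases hs : PySem.Str.strip a = ""
    · simp only [hs, reduceIte]
      exact ih acc h
    · simp only [if_neg hs]
      by_cases h12 : (acc ++ [PySem.Str.strip a]).length = 12
      · have : 12 - acc.length = 1 := by simp at h12; omega
        simp [h12, this]
      · have hlt : (acc ++ [PySem.Str.strip a]).length < 12 := by
          simp at h12 ⊢; omega
        rw [if_neg h12, ih _ hlt]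
        have : 12 - acc.length = (12 - (acc ++ [PySem.Str.strip a]).length) + 1 := by
          simp; omega
        simp [this, List.take_succ_cons, fahTr]

theorem fahTr_reverse (l : List String) : fahTr l.reverse = (fahTr l).reverse := by
  simp [fahTr, List.filterMap_reverse]

theorem format_action_history_py_spec : Claim_equal_format_action_history_py := by
  intro l _
  unfold Spec_format_action_history_py format_action_history_py format_action_history_py_alt
  cases l with
  | none => simp [fahCollect]
  | some l =>
    simp only [Option.getD_some]
    rw [fahCollect_eq _ _ (by simp), fahTr_reverse, fahTr_eq]
    by_cases hl : l = []
    · subst hl; simp [fahTr]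
    · rw [if_neg hl]
      set tr := fahTr l with htr
      simp only [List.nil_append, List.length_nil]
      by_cases ht : tr = []
      · simp [ht]
      · have h1 : tr.reverse.take (12 - 0) ≠ [] := by
          simp [List.take_eq_nil_iff, ht]
        rw [if_neg ht, if_neg h1]
        congr 1
        rw [PySem.List.slice_from_neg_ofNat tr 12 (by norm_num)]
        congr 1
        simp [List.take_reverse]
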